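-- pv_equiv track=rewrite | github.com/henrikingo/dsi | signal_processing/change_points/helpers.py | _generate_all_change_point_ranges
-- ===== SOURCE A (Python) =====
-- def _generate_all_change_point_ranges(full_series, change_points):
--     """
--     Generate the ranges for all change points.
--
--     :param dict full_series: The time series data.
--     :param list(dict) change_points: The change points.
--     :return: The start and end indexes for the change points.
--     :rtype: (int, int).
--     """
--     start = full_series['orders'][0]
--     if change_points:
--         for change_point in change_points:
--             end = change_point['order']
--             yield (start, end)
--             start = end
--     # yield from the last change point to the end of the time series
--     yield (start, full_series['orders'][-1])
-- ===== SOURCE B (Python) =====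
-- def _generate_all_change_point_ranges(full_series, change_points):
--     """Recursive decomposition: peel off the first change point, yield its range,
--     recurse on the rest; the base case closes the final range to the series end."""
--     def ranges_from(start, remaining):
--         if not remaining:
--             yield (start, full_series['orders'][-1])
--         else:
--             end = remaining[0]['order']
--             yield (start, end)
--             yield from ranges_from(end, remaining[1:])
--
--     yield from ranges_from(full_series['orders'][0], change_points)
-- ===== Notes on version B (the rewrite author's own statement) =====
-- stated objective: alternative
-- what changed: B is a recursive decomposition: a helper generator peels off the first change point, yields one range and recurses on the remaining list, the base case emitting the final range to the series end, instead of A's iterative loop that threads `start` and ends with a trailing yield.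
import Mathlib
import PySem

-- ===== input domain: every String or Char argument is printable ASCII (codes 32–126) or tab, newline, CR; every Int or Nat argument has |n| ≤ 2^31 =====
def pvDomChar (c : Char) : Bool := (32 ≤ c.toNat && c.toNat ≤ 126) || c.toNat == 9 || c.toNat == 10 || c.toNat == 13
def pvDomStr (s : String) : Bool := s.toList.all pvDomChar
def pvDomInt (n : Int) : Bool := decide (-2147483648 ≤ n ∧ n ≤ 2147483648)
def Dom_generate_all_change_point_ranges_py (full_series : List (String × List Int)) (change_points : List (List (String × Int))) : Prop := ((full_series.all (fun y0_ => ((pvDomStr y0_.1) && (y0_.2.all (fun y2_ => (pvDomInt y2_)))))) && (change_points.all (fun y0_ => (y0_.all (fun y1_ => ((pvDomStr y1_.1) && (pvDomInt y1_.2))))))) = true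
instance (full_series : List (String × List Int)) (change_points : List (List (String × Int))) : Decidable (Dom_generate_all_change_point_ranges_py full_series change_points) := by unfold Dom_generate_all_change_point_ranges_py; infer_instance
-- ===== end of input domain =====

-- ===== PORT A =====
-- B is a recursive decomposition (peel first change point, recurse) instead of A's
-- iterative start-threading loop with a trailing yield (alternative, same cost).
-- Outside Pre_ (missing 'orders'/'order' key or empty orders) Python A raises; the
-- ports return [] there, excluded by Pre_.
def generate_all_change_point_ranges_py (full_series : List (String × List Int)) (change_points : List (List (String × Int))) : List (Int × Int) :=
  match PySem.Dict.get? (PySem.Dict.mk full_series) "orders" with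
  | none => []
  | some orders =>
    match PySem.List.pyGet? orders 0 with
    | none => []
    | some start0 =>
      -- the for-loop: thread `start`, append each (start, end)
      let st := change_points.foldl
        (fun (acc : Int × List (Int × Int)) change_point =>
          let e := PySem.Dict.getD (PySem.Dict.mk change_point) "order" 0
          (e, acc.2 ++ [(acc.1, e)]))
        (start0, [])
      match PySem.List.pyGet? orders (-1) with
      | none => []
      | some last => st.2 ++ [(st.1, last)]

-- ===== PORT B =====
-- recursive helper `ranges_from(start, remaining)` from Source B (closes over full_series)
def pvRangesFrom (full_series : List (String × List Int)) (start : Int) : List (List (String × Int)) → List (Int × Int)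
  | [] =>
    match PySem.Dict.get? (PySem.Dict.mk full_series) "orders" with
    | none => []
    | some orders =>
      match PySem.List.pyGet? orders (-1) with
      | none => []
      | some last => [(start, last)]
  | cp :: rest =>
    let e := PySem.Dict.getD (PySem.Dict.mk cp) "order" 0
    (start, e) :: pvRangesFrom full_series e rest

def generate_all_change_point_ranges_py_alt (full_series : List (String × List Int)) (change_points : List (List (String × Int))) : List (Int × Int) :=
  match PySem.Dict.get? (PySem.Dict.mk full_series) "orders" with
  | none => []
  | some orders =>
    match PySem.List.pyGet? orders 0 with
    | none => []
    | some start0 => pvRangesFrom full_series start0 change_points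

-- ===== PRECONDITION & SPEC =====
-- Pre_ excludes exactly the inputs where Python A raises: no 'orders' key, an empty
-- orders list (IndexError), or a change point without an 'order' key (KeyError).
def Pre_generate_all_change_point_ranges_py (full_series : List (String × List Int)) (change_points : List (List (String × Int))) : Prop :=
  (PySem.Dict.get? (PySem.Dict.mk full_series) "orders").isSome ∧
  PySem.Dict.getD (PySem.Dict.mk full_series) "orders" [] ≠ [] ∧
  ∀ cp ∈ change_points, (PySem.Dict.get? (PySem.Dict.mk cp) "order").isSome
instance (full_series : List (String × List Int)) (change_points : List (List (String × Int))) : Decidable (Pre_generate_all_change_point_ranges_py full_series change_points) := by unfold Pre_generate_all_change_point_ranges_py; infer_instance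
def pvWitness_generate_all_change_point_ranges_py : (List (String × List Int)) × (List (List (String × Int))) :=
  ([("orders", [1, 5, 9])], [[("order", 3)], [("order", 7)]])
def Spec_generate_all_change_point_ranges_py (full_series : List (String × List Int)) (change_points : List (List (String × Int))) (out : List (Int × Int)) : Prop := out = generate_all_change_point_ranges_py_alt full_series change_points
instance (full_series : List (String × List Int)) (change_points : List (List (String × Int))) (out : List (Int × Int)) : Decidable (Spec_generate_all_change_point_ranges_py full_series change_points out) := by unfold Spec_generate_all_change_point_ranges_py; infer_instance

-- ===== CLAIM (what is proved, stated in full; the proofs are below) =====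
def Claim_equal_generate_all_change_point_ranges_py : Prop := ∀ (full_series : List (String × List Int)) (change_points : List (List (String × Int))), Dom_generate_all_change_point_ranges_py full_series change_points → Pre_generate_all_change_point_ranges_py full_series change_points → Spec_generate_all_change_point_ranges_py full_series change_points (generate_all_change_point_ranges_py full_series change_points)

-- ===== LEMMAS AND PROOFS =====

-- A's fold, with the final pair appended, equals B's recursion (for any accumulator)
theorem pvFoldl_eq_rangesFrom (full_series : List (String × List Int)) (orders : List Int) (last : Int)
    (hd : PySem.Dict.get? (PySem.Dict.mk full_series) "orders" = some orders)
    (hl : PySem.List.pyGet? orders (-1) = some last) :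
    ∀ (cps : List (List (String × Int))) (s : Int) (acc : List (Int × Int)),
      ((cps.foldl
          (fun (a : Int × List (Int × Int)) change_point =>
            let e := PySem.Dict.getD (PySem.Dict.mk change_point) "order" 0
            (e, a.2 ++ [(a.1, e)]))
          (s, acc)).2 ++ [((cps.foldl
          (fun (a : Int × List (Int × Int)) change_point =>
            let e := PySem.Dict.getD (PySem.Dict.mk change_point) "order" 0
            (e, a.2 ++ [(a.1, e)]))
          (s, acc)).1, last)]) = acc ++ pvRangesFrom full_series s cps := by
  intro cps
  induction cps with
  | nil => intro s acc; simp [pvRangesFrom, hd, hl]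
  | cons cp rest ih =>
    intro s acc
    simp only [List.foldl_cons, pvRangesFrom]
    rw [ih]
    simp

-- ===== VERDICT (by name: the statement is the Claim_ definition above) =====
theorem generate_all_change_point_ranges_py_spec : Claim_equal_generate_all_change_point_ranges_py := by
  intro full_series change_points _ hpre
  unfold Spec_generate_all_change_point_ranges_py
  unfold generate_all_change_point_ranges_py generate_all_change_point_ranges_py_alt
  obtain ⟨h1, h2, _⟩ := hpre
  cases hd : PySem.Dict.get? (PySem.Dict.mk full_series) "orders" with
  | none => simp [hd] at h1
  | some orders =>
    have hne : orders ≠ [] := by simpa [PySem.Dict.getD, hd] using h2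
    have hf : PySem.List.pyGet? orders 0 = some (orders.headD 0) := by
      cases orders with
      | nil => exact absurd rfl hne
      | cons a l => simp
    have hl : PySem.List.pyGet? orders (-1) = some (orders.getLastD 0) := by
      rw [PySem.List.pyGet?_neg_one]
      cases orders with
      | nil => exact absurd rfl hne
      | cons a l =>
        cases h : (a :: l).getLast? with
        | none => simp [List.getLast?_eq_none_iff] at h
        | some v => simp [List.getLastD_eq_getLast?, h]
    simp only [hf, hl]
    simpa using pvFoldl_eq_rangesFrom full_series orders (orders.getLastD 0) hd hl change_points (orders.headD 0) []
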